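-- pv_equiv track=rewrite | github.com/adnansabbir/LeetcodeProblems | 84-largest-rectangle-in-histogram/84-largest-rectangle-in-histogram.py | getLeftMaxLimit
-- ===== SOURCE A (Python) =====
-- from typing import List
--
-- def getLeftMaxLimit(heights: List[int])-> List[int]:
--     stack = [0]
--     left = [0]
--
--     for i in range(1, len(heights)):
--         while stack:
--             if heights[stack[-1]] >= heights[i]:
--                 stack.pop()
--             else:
--                 left.append(stack[-1]+1)
--                 break
--         if not stack:
--             left.append(0)
--
--         stack.append(i)
--
--     return left
-- ===== SOURCE B (Python) =====
-- from typing import List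
--
-- def getLeftMaxLimit(heights: List[int]) -> List[int]:
--     # Stack-free: jump over already-resolved runs via the boundaries stored in left.
--     left = [0]
--     for i in range(1, len(heights)):
--         p = i - 1
--         while p >= 0 and heights[p] >= heights[i]:
--             p = left[p] - 1
--         left.append(p + 1)
--     return left
-- ===== Notes on version B (the rewrite author's own statement) =====
-- stated objective: alternative
-- what changed: Drops A's explicit stack of unresolved indices; B keeps only the result list and resolves each bar by jumping backwards over whole already-resolved runs via p = left[p] - 1.
import Mathlib
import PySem

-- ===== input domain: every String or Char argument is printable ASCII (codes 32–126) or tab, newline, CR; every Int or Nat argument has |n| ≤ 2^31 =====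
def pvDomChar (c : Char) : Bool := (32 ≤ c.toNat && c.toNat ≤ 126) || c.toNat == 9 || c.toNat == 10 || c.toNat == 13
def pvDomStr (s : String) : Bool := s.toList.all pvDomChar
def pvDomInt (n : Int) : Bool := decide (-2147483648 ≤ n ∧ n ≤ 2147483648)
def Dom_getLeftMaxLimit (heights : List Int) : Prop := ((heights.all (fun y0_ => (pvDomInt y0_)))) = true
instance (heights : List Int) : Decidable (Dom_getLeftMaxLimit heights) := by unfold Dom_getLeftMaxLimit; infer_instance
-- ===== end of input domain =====

-- B drops A's explicit stack and resolves each bar by jumping backwards over already-resolved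
-- runs via the boundaries stored in the result list itself (alternative algorithm, same cost).

-- ===== PORT A =====
-- Python's stack has its top at the END of the list; here the stack list keeps its TOP AT THE HEAD
-- (same elements, same pops/pushes, access to the top is stack[-1] there and head here).
-- The `while stack:` loop (pop on >=, append-and-break on <) is `popA`; all indices pushed on the
-- stack are in range, so `getD _ 0` returns exactly Python's heights[...] wherever it is evaluated.
def popA (h : List Int) (hi : Int) : List Nat → List Int → List Nat × List Int
  | [], left => ([], left)                                   -- while exits with empty stack
  | t :: rest, left =>
    if hi ≤ h.getD t 0 then popA h hi rest left              -- heights[stack[-1]] >= heights[i]: pop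
    else (t :: rest, left ++ [(t : Int) + 1])                -- else: left.append(stack[-1]+1); break

-- one iteration of `for i in range(1, len(heights))`
def stepA (h : List Int) (st : List Nat × List Int) (i : Nat) : List Nat × List Int :=
  match popA h (h.getD i 0) st.1 st.2 with
  | (s, l) => (i :: s, if s = [] then l ++ [0] else l)       -- if not stack: left.append(0); stack.append(i)

def getLeftMaxLimit (heights : List Int) : List Int :=
  ((List.range' 1 (heights.length - 1)).foldl (stepA heights) ([0], [0])).2

-- ===== PORT B =====
-- the `while p >= 0 and heights[p] >= heights[i]: p = left[p] - 1` loop; fuel i bounds the number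
-- of jumps (p strictly decreases because every stored boundary satisfies left[p] <= p, proved below),
-- so the fuel-out branch is never reached on any run.
def jumpB (h : List Int) (hi : Int) (left : List Int) : Nat → Int → Int
  | 0, p => p
  | f + 1, p =>
    if 0 ≤ p ∧ hi ≤ h.getD p.toNat 0 then jumpB h hi left f (left.getD p.toNat 0 - 1)
    else p

-- one iteration of `for i in range(1, len(heights))`: p starts at i-1, then left.append(p+1)
def stepB (h : List Int) (left : List Int) (i : Nat) : List Int :=
  left ++ [jumpB h (h.getD i 0) left i ((i : Int) - 1) + 1]

def getLeftMaxLimit_alt (heights : List Int) : List Int :=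
  (List.range' 1 (heights.length - 1)).foldl (stepB heights) [0]

-- ===== PRECONDITION & SPEC =====
def Spec_getLeftMaxLimit (heights : List Int) (out : List Int) : Prop := out = getLeftMaxLimit_alt heights
instance (heights : List Int) (out : List Int) : Decidable (Spec_getLeftMaxLimit heights out) := by unfold Spec_getLeftMaxLimit; infer_instance

-- ===== CLAIM (what is proved, stated in full; the proofs are below) =====
def Claim_equal_getLeftMaxLimit : Prop := ∀ (heights : List Int), Dom_getLeftMaxLimit heights → Spec_getLeftMaxLimit heights (getLeftMaxLimit heights)

-- ===== LEMMAS AND PROOFS =====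

-- the common description of entry i: the naive backwards scan, 1 + the nearest j < i with h[j] < h[i], else 0
def prevS (h : List Int) (hi : Int) : Nat → Int
  | 0 => 0
  | p + 1 => if hi ≤ h.getD p 0 then prevS h hi p else (p : Int) + 1

def specAt (h : List Int) (i : Nat) : Int := prevS h (h.getD i 0) i

def goodB (h : List Int) (m j : Nat) : Bool := decide (∀ k < m + 1, j < k → h.getD j 0 < h.getD k 0)

def goodStack (h : List Int) (m : Nat) : List Nat :=
  ((List.range (m + 1)).filter (goodB h m)).reverse

def valOf : List Nat → Int
  | [] => 0
  | t :: _ => (t : Int) + 1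

theorem prevS_nonneg (h : List Int) (hi : Int) (m : Nat) : 0 ≤ prevS h hi m := by
  induction m with
  | zero => simp [prevS]
  | succ p ih => simp only [prevS]; split <;> [exact ih; positivity]

theorem prevS_le (h : List Int) (hi : Int) (m : Nat) : prevS h hi m ≤ (m : Int) := by
  induction m with
  | zero => simp [prevS]
  | succ p ih =>
    simp only [prevS]; split
    · exact le_trans ih (by push_cast; omega)
    · push_cast; omega

theorem prevS_skip (h : List Int) (hi : Int) (m : Nat) :
    ∀ k : Nat, prevS h hi m ≤ (k : Int) → k < m → hi ≤ h.getD k 0 := by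
  induction m with
  | zero => intro k _ hk; omega
  | succ p ih =>
    intro k hle hk
    simp only [prevS] at hle
    split at hle
    · rcases Nat.lt_succ_iff_lt_or_eq.mp hk with h' | h'
      · exact ih k hle h'
      · subst h'; assumption
    · omega

theorem prevS_stable (h : List Int) (hi : Int) :
    ∀ (m m' : Nat), m' ≤ m → (∀ k : Nat, m' ≤ k → k < m → hi ≤ h.getD k 0) →
    prevS h hi m = prevS h hi m' := by
  intro m
  induction m with
  | zero => intro m' hm _; interval_cases m'; rfl
  | succ p ih =>
    intro m' hm hall
    rcases Nat.lt_succ_iff_lt_or_eq.mp (Nat.lt_succ_of_le hm) with h' | h'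
    · have hp : hi ≤ h.getD p 0 := hall p (by omega) (by omega)
      simp only [prevS, if_pos hp]
      exact ih m' (by omega) (fun k hk1 hk2 => hall k hk1 (by omega))
    · subst h'; rfl

theorem jump_eq (h : List Int) (hi : Int) (M : Nat) :
    ∀ (m f : Nat), m ≤ M + 1 → m ≤ f →
    jumpB h hi ((List.range (M + 1)).map (specAt h)) f ((m : Int) - 1) = prevS h hi m - 1 := by
  intro m
  induction m using Nat.strong_induction_on with
  | _ m IH =>
    intro f hM hf
    match m with
    | 0 =>
      cases f with
      | zero => simp [jumpB, prevS]
      | succ f' => simp [jumpB, prevS]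
    | q + 1 =>
      obtain ⟨f', rfl⟩ : ∃ f', f = f' + 1 := ⟨f - 1, by omega⟩
      have hq : ((q : Int) + 1) - 1 = (q : Int) := by ring
      by_cases hcond : hi ≤ h.getD q 0
      · have htn : ((q : Int)).toNat = q := Int.toNat_natCast q
        have hgetD : ((List.range (M + 1)).map (specAt h)).getD q 0 = specAt h q := by
          rw [List.getD_eq_getElem?_getD, List.getElem?_map, List.getElem?_range (by omega)]
          rfl
        set v := prevS h (h.getD q 0) q with hv
        have hv0 : 0 ≤ v := prevS_nonneg _ _ _
        have hvq : v ≤ (q : Int) := prevS_le _ _ _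
        set m' := v.toNat with hm'
        have hm'v : (m' : Int) = v := Int.toNat_of_nonneg hv0
        have hm'q : m' ≤ q := by omega
        have hrec : jumpB h hi ((List.range (M + 1)).map (specAt h)) f' ((m' : Int) - 1)
            = prevS h hi m' - 1 :=
          IH m' (by omega) f' (by omega) (by omega)
        have hstable : prevS h hi (q + 1) = prevS h hi m' := by
          apply prevS_stable
          · omega
          · intro k hk1 hk2
            rcases Nat.lt_succ_iff_lt_or_eq.mp hk2 with h' | h'
            · have := prevS_skip h (h.getD q 0) q k (by rw [← hv] at *; omega) h'
              exact le_trans hcond this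
            · subst h'; exact hcond
        show jumpB h hi _ (f' + 1) (((q : Nat) + 1 : Int) - 1) = _
        simp only [jumpB]
        rw [hq, if_pos ⟨by positivity, by rwa [htn]⟩, htn, hgetD]
        show jumpB h hi _ f' (v - 1) = _
        rw [← hm'v, hrec, hstable]
      · show jumpB h hi _ (f' + 1) (((q : Nat) + 1 : Int) - 1) = _
        simp only [jumpB]
        rw [hq, if_neg (by rw [Int.toNat_natCast]; tauto)]
        simp only [prevS, if_neg hcond]
        ring

theorem invB (h : List Int) :
    ∀ m : Nat, (List.range' 1 m).foldl (stepB h) [0] = (List.range (m + 1)).map (specAt h) := by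
  intro m
  induction m with
  | zero => simp [List.range_succ, specAt, prevS]
  | succ m ih =>
    rw [List.range'_1_concat, List.foldl_append, ih]
    simp only [List.foldl_cons, List.foldl_nil, stepB]
    have h1m : 1 + m = m + 1 := by omega
    rw [h1m, jump_eq h (h.getD (m + 1) 0) m (m + 1) (m + 1) (by omega) (by omega)]
    rw [List.range_succ (n := m + 1), List.map_append]
    simp [specAt]

-- ===== A side =====

theorem stepA_eq (h : List Int) (i : Nat) :
    ∀ (S : List Nat) (L : List Int),
    stepA h (S, L) i = (i :: S.dropWhile (fun t => decide (h.getD i 0 ≤ h.getD t 0)),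
      L ++ [valOf (S.dropWhile (fun t => decide (h.getD i 0 ≤ h.getD t 0)))]) := by
  intro S
  induction S with
  | nil => intro L; simp [stepA, popA, List.dropWhile, valOf]
  | cons t rest ih =>
    intro L
    by_cases hc : h.getD i 0 ≤ h.getD t 0
    · have hstep : stepA h (t :: rest, L) i = stepA h (rest, L) i := by
        simp only [stepA, popA, if_pos hc]
      have hdw : List.dropWhile (fun t => decide (h.getD i 0 ≤ h.getD t 0)) (t :: rest)
          = List.dropWhile (fun t => decide (h.getD i 0 ≤ h.getD t 0)) rest := by
        rw [List.dropWhile_cons,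
          if_pos (by simp only [decide_eq_true_eq]; exact hc)]
      rw [hstep, ih L, hdw]
    · have hdw : List.dropWhile (fun t => decide (h.getD i 0 ≤ h.getD t 0)) (t :: rest)
          = t :: rest := by
        rw [List.dropWhile_cons,
          if_neg (by simp only [decide_eq_true_eq]; exact hc)]
      rw [hdw]
      simp only [stepA, popA, if_neg hc, valOf]
      simp

theorem dw_filter {P : Nat → Bool} :
    ∀ (S : List Nat), S.Pairwise (fun a b => P a = true → P b = true) →
    S.dropWhile (fun t => !P t) = S.filter P := by
  intro S
  induction S with
  | nil => intro _; rfl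
  | cons t rest ih =>
    intro hpw
    rcases List.pairwise_cons.mp hpw with ⟨hall, hpw'⟩
    cases hP : P t with
    | true =>
      rw [List.dropWhile_cons]
      simp only [hP, Bool.not_true]
      rw [List.filter_cons_of_pos hP, if_neg (by simp)]
      rw [List.filter_eq_self.mpr (fun b hb => hall b hb hP)]
    | false =>
      rw [List.dropWhile_cons, if_pos (by simp [hP]),
        List.filter_cons_of_neg (by simp [hP]), ih hpw']

theorem pw_goodStack (h : List Int) (m : Nat) :
    (goodStack h m).Pairwise (fun a b => h.getD b 0 < h.getD a 0) := by
  unfold goodStack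
  rw [List.pairwise_reverse]
  have hsub : ((List.range (m + 1)).filter (goodB h m)).Pairwise (fun a b => a < b) :=
    List.Pairwise.sublist List.filter_sublist List.pairwise_lt_range
  refine hsub.imp_of_mem ?_
  intro a b ha hb hab
  rcases List.mem_filter.mp ha with ⟨hamem, hagood⟩
  rcases List.mem_filter.mp hb with ⟨hbmem, _⟩
  have hb1 : b < m + 1 := List.mem_range.mp hbmem
  have := of_decide_eq_true hagood
  exact this b hb1 hab

theorem gs_pairwise_imp (h : List Int) (m : Nat) (hi : Int) :
    (goodStack h m).Pairwise
      (fun a b => decide (h.getD a 0 < hi) = true → decide (h.getD b 0 < hi) = true) := by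
  refine (pw_goodStack h m).imp ?_
  intro a b hba ha
  have := of_decide_eq_true ha
  exact decide_eq_true (lt_trans hba this)

theorem key2 (h : List Int) (m : Nat) :
    goodStack h (m + 1) =
      (m + 1) :: (goodStack h m).filter (fun t => decide (h.getD t 0 < h.getD (m + 1) 0)) := by
  unfold goodStack
  rw [List.range_succ, List.filter_append, List.reverse_append]
  have hgood : goodB h (m + 1) (m + 1) = true := by
    apply decide_eq_true; intro k hk1 hk2; omega
  rw [List.filter_cons_of_pos hgood]
  simp only [List.filter_nil, List.reverse_cons, List.reverse_nil, List.nil_append,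
    List.cons_append]
  rw [← List.filter_reverse, ← List.filter_reverse, List.filter_filter]
  congr 1
  apply List.filter_congr
  intro j hj
  have hjm : j < m + 1 := List.mem_range.mp (List.mem_reverse.mp hj)
  simp only [goodB, ← Bool.decide_and]
  rw [decide_eq_decide]
  constructor
  · intro hall
    exact ⟨hall (m + 1) (by omega) hjm, fun k hk1 hk2 => hall k (by omega) hk2⟩
  · rintro ⟨h1, h2⟩ k hk1 hk2
    rcases Nat.lt_succ_iff_lt_or_eq.mp hk1 with h' | h'
    · exact h2 k h' hk2
    · subst h'; exact h1

theorem prevS_find (h : List Int) (hi : Int) :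
    ∀ m : Nat, prevS h hi m =
      (match (List.range m).reverse.find? (fun j => decide (h.getD j 0 < hi)) with
       | some j => (j : Int) + 1
       | none => 0) := by
  intro m
  induction m with
  | zero => simp [prevS]
  | succ m ih =>
    rw [List.range_succ, List.reverse_append]
    simp only [List.reverse_cons, List.reverse_nil, List.nil_append, List.singleton_append,
      List.find?_cons]
    by_cases hc : h.getD m 0 < hi
    · simp only [prevS, if_neg (not_le.mpr hc), decide_eq_true hc]
    · simp only [prevS, if_pos (not_lt.mp hc), decide_eq_false hc]
      exact ih

theorem find_good (h : List Int) (hi : Int) (m : Nat) :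
    ∀ c : Nat, c ≤ m + 1 → (∀ k : Nat, c ≤ k → k ≤ m → ¬(h.getD k 0 < hi)) →
    (List.range c).reverse.find? (fun j => decide (h.getD j 0 < hi) && goodB h m j)
      = (List.range c).reverse.find? (fun j => decide (h.getD j 0 < hi)) := by
  intro c
  induction c with
  | zero => intro _ _; rfl
  | succ c ih =>
    intro hcm hall
    rw [List.range_succ, List.reverse_append]
    simp only [List.reverse_cons, List.reverse_nil, List.nil_append, List.singleton_append,
      List.find?_cons]
    by_cases hc : h.getD c 0 < hi
    · have hgood : goodB h m c = true := by
        apply decide_eq_true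
        intro k hk1 hk2
        have : hi ≤ h.getD k 0 := not_lt.mp (hall k (by omega) (by omega))
        exact lt_of_lt_of_le hc this
      rw [List.getD_eq_getElem?_getD] at hc
      simp [hc, hgood]
    · simp only [decide_eq_false hc, Bool.false_and]
      exact ih (by omega) (fun k hk1 hk2 => by
        rcases Nat.eq_or_lt_of_le hk1 with h' | h'
        · subst h'; exact hc
        · exact hall k (by omega) hk2)

theorem valOf_head (S : List Nat) :
    valOf S = (match S.head? with | some t => (t : Int) + 1 | none => 0) := by
  cases S <;> rfl

theorem key3 (h : List Int) (m : Nat) :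
    valOf ((goodStack h m).filter (fun t => decide (h.getD t 0 < h.getD (m + 1) 0)))
      = specAt h (m + 1) := by
  set hi := h.getD (m + 1) 0 with hhi
  rw [valOf_head]
  unfold goodStack
  rw [← List.filter_reverse, List.filter_filter, List.head?_filter]
  rw [find_good h hi m (m + 1) (le_refl _) (fun k hk1 hk2 => by omega)]
  rw [specAt, ← hhi, prevS_find h hi (m + 1)]

theorem invA (h : List Int) :
    ∀ m : Nat, (List.range' 1 m).foldl (stepA h) ([0], [0])
      = (goodStack h m, (List.range (m + 1)).map (specAt h)) := by
  intro m
  induction m with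
  | zero =>
    simp only [List.range'_zero, List.foldl_nil]
    have : goodStack h 0 = [0] := by
      unfold goodStack
      have : goodB h 0 0 = true := by apply decide_eq_true; intro k hk1 hk2; omega
      simp [List.range_succ, this]
    rw [this]
    simp [List.range_succ, specAt, prevS]
  | succ m ih =>
    rw [List.range'_1_concat, List.foldl_append, ih]
    simp only [List.foldl_cons, List.foldl_nil]
    have h1m : 1 + m = m + 1 := by omega
    rw [h1m, stepA_eq]
    have hpred : (fun t => decide (h.getD (m + 1) 0 ≤ h.getD t 0))
        = (fun t => !(decide (h.getD t 0 < h.getD (m + 1) 0))) := by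
      funext t
      simp [← decide_not, not_lt]
    rw [hpred, dw_filter (goodStack h m) (gs_pairwise_imp h m (h.getD (m + 1) 0))]
    rw [key3 h m, ← key2 h m]
    conv_rhs => rw [List.range_succ, List.map_append]
    simp

-- ===== VERDICT (by name: the statement is the Claim_ definition above) =====
theorem getLeftMaxLimit_spec : Claim_equal_getLeftMaxLimit := by
  intro heights _
  unfold Spec_getLeftMaxLimit getLeftMaxLimit getLeftMaxLimit_alt
  rw [invA heights (heights.length - 1), invB heights (heights.length - 1)]
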